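-- pv_equiv track=rewrite | github.com/chuongnvk54/RECOGNIZE_ID_CARD | tools/process_text.py | score_nguyenquan
-- ===== SOURCE A (Python) =====
-- def score_nguyenquan(key):
--     s = 0
--     for i in {'ng', 'gu', 'uy', 'ye', 'en', 'n ', ' q', 'qu', 'ua','an'}:
--         if key.find(i) != -1:
--             s = s+1
--     for i in {'ngu', 'guy', 'uye', 'yen', 'en ', 'n q',' qu', 'qua', 'uan'}:
--         if key.find(i) != -1:
--             s = s+3
--     for i in {'nguy', 'guye', 'uyen', 'yen ', 'en q', 'n qu', ' qua', 'quan'}: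
--         if key.find(i) != -1:
--             s = s+5
--
--     return s
-- ===== SOURCE B (Python) =====
-- TARGETS2 = {'ng', 'gu', 'uy', 'ye', 'en', 'n ', ' q', 'qu', 'ua', 'an'}
-- TARGETS3 = {'ngu', 'guy', 'uye', 'yen', 'en ', 'n q', ' qu', 'qua', 'uan'}
-- TARGETS4 = {'nguy', 'guye', 'uyen', 'yen ', 'en q', 'n qu', ' qua', 'quan'}
--
--
-- def _matched(key, targets, n):
--     subs = {key[i:i + n] for i in range(len(key) - n + 1)}
--     return len(subs & targets)
--
--
-- def score_nguyenquan(key):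
--     return (_matched(key, TARGETS2, 2)
--             + 3 * _matched(key, TARGETS3, 3)
--             + 5 * _matched(key, TARGETS4, 4))
-- ===== Notes on version B (the rewrite author's own statement) =====
-- stated objective: alternative
-- what changed: Instead of scanning the key with str.find once per each of the 27 target patterns, B enumerates the key's substrings of lengths 2, 3 and 4 into sets and scores by the sizes of their intersections with the literal target sets.
import Mathlib
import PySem

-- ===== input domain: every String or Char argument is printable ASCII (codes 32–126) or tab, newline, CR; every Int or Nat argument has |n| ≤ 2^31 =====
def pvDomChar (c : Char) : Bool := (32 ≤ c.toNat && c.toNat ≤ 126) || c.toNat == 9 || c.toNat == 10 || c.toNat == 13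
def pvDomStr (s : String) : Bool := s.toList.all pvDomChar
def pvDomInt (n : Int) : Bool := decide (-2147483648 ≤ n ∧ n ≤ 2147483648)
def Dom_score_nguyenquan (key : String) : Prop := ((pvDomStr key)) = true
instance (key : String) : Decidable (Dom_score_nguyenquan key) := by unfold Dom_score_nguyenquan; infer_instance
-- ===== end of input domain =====

-- B replaces A's repeated str.find scans with one enumeration of the key's substrings
-- of each length followed by set intersections with the target sets (objective: alternative).

-- ===== PORT A =====
-- the three set literals of A, in source order (the loops only add, so iteration order is irrelevant)
def pvA2 : List String := ["ng", "gu", "uy", "ye", "en", "n ", " q", "qu", "ua", "an"]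
def pvA3 : List String := ["ngu", "guy", "uye", "yen", "en ", "n q", " qu", "qua", "uan"]
def pvA4 : List String := ["nguy", "guye", "uyen", "yen ", "en q", "n qu", " qua", "quan"]

def score_nguyenquan (key : String) : Int :=
  let s : Int := 0
  let s := pvA2.foldl (fun s i => if PySem.Str.find key i ≠ -1 then s + 1 else s) s
  let s := pvA3.foldl (fun s i => if PySem.Str.find key i ≠ -1 then s + 3 else s) s
  let s := pvA4.foldl (fun s i => if PySem.Str.find key i ≠ -1 then s + 5 else s) s
  s

-- ===== PORT B =====
def pvT2 : PySem.Set String := PySem.Set.ofList ["ng", "gu", "uy", "ye", "en", "n ", " q", "qu", "ua", "an"]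
def pvT3 : PySem.Set String := PySem.Set.ofList ["ngu", "guy", "uye", "yen", "en ", "n q", " qu", "qua", "uan"]
def pvT4 : PySem.Set String := PySem.Set.ofList ["nguy", "guye", "uyen", "yen ", "en q", "n qu", " qua", "quan"]

-- _matched(key, targets, n) = len({key[i:i+n] for i in range(len(key)-n+1)} & targets)
def pvMatched (key : String) (targets : PySem.Set String) (n : Int) : Int :=
  ((PySem.Set.inter
      (PySem.Set.ofList
        ((PySem.List.pyRange 0 (PySem.Str.len key - n + 1)).map
          (fun i => PySem.Str.slice key (some i) (some (i + n)))))
      targets).length : Int)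

def score_nguyenquan_alt (key : String) : Int :=
  pvMatched key pvT2 2 + 3 * pvMatched key pvT3 3 + 5 * pvMatched key pvT4 4

-- ===== PRECONDITION & SPEC =====
def Spec_score_nguyenquan (key : String) (out : Int) : Prop := out = score_nguyenquan_alt key
instance (key : String) (out : Int) : Decidable (Spec_score_nguyenquan key out) := by unfold Spec_score_nguyenquan; infer_instance

-- ===== CLAIM (what is proved, stated in full; the proofs are below) =====
def Claim_equal_score_nguyenquan : Prop := ∀ (key : String), Dom_score_nguyenquan key → Spec_score_nguyenquan key (score_nguyenquan key)

-- ===== LEMMAS AND PROOFS =====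

-- A's loop shape: a weighted count of the patterns satisfying the test
lemma pv_foldl_w (P : String → Prop) [DecidablePred P] (w : Int) (l : List String) (a : Int) :
    l.foldl (fun s p => if P p then s + w else s) a
      = a + w * (l.countP (fun p => decide (P p)) : Int) := by
  induction l generalizing a with
  | nil => simp
  | cons h t ih =>
      simp only [List.foldl_cons, List.countP_cons, ih]
      by_cases hf : P h <;> simp [hf] <;> try ring

-- counting an intersection of two duplicate-free lists from the second side
lemma pv_inter_len {S T : List String} (hS : S.Nodup) (hT : T.Nodup) :
    (PySem.Set.inter S T).length = (T.filter (fun p => decide (p ∈ S))).length := by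
  have hperm : (S.filter (fun x => T.contains x)).Perm (T.filter (fun p => decide (p ∈ S))) := by
    rw [List.perm_ext_iff_of_nodup (hS.filter _) (hT.filter _)]
    intro a
    simp [List.mem_filter, and_comm]
  simpa [PySem.Set.inter] using hperm.length_eq

-- membership in B's list of length-n substrings of the key is exactly infix-hood
lemma pv_mem_subs (key p : String) (n : Nat) (hp : p.toList.length = n) :
    p ∈ (PySem.List.pyRange 0 (PySem.Str.len key - (n : Int) + 1)).map
          (fun i => PySem.Str.slice key (some i) (some (i + (n : Int))))
      ↔ p.toList <:+: key.toList := by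
  rw [List.mem_map]
  constructor
  · rintro ⟨i, hi, rfl⟩
    rw [PySem.List.mem_pyRange_one] at hi
    obtain ⟨m, rfl⟩ : ∃ m : Nat, (m : Int) = i := ⟨i.toNat, by omega⟩
    have hsl : (PySem.Str.slice key (some (m : Int)) (some ((m : Int) + (n : Int)))).toList
        = (key.toList.drop m).take n := by
      rw [PySem.Str.toList_slice, PySem.Chars.slice_eq_listSlice,
        PySem.List.slice_natCast_add]
    rw [hsl]
    exact (List.take_prefix n _).isInfix.trans (List.drop_suffix m _).isInfix
  · rintro ⟨s, t, hst⟩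
    have hlen : key.toList.length = s.length + n + t.length := by
      rw [← hst]; simp only [List.length_append, hp]
    refine ⟨(s.length : Int), ?_, ?_⟩
    · rw [PySem.List.mem_pyRange_one, PySem.Str.len_eq]
      omega
    · apply String.toList_inj.mp
      rw [PySem.Str.toList_slice, PySem.Chars.slice_eq_listSlice,
        PySem.List.slice_natCast_add, ← hst, List.append_assoc, List.drop_left,
        ← hp, List.take_left]

-- one weighted block of A equals one _matched call of B
lemma pv_block (key : String) (T : List String) (n : Nat)
    (hT : T.Nodup) (hl : ∀ p ∈ T, p.toList.length = n) :
    (T.countP (fun p => decide (PySem.Str.find key p ≠ -1)) : Int)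
      = pvMatched key (PySem.Set.ofList T) (n : Int) := by
  unfold pvMatched
  rw [pv_inter_len (PySem.Set.nodup_ofList _) (PySem.Set.nodup_ofList _),
    PySem.Set.ofList_eq_self_of_nodup T hT, ← List.countP_eq_length_filter]
  congr 1
  apply List.countP_congr
  intro p hpT
  have hlen := hl p hpT
  have : (PySem.Str.find key p ≠ -1) ↔
      (p ∈ PySem.Set.ofList
        ((PySem.List.pyRange 0 (PySem.Str.len key - (n : Int) + 1)).map
          (fun i => PySem.Str.slice key (some i) (some (i + (n : Int)))))) := by
    rw [PySem.Set.mem_ofList, pv_mem_subs key p n hlen]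
    exact (PySem.Str.find_eq_neg_one_iff key p).not_left
  simpa using this

-- ===== VERDICT (by name: the statement is the Claim_ definition above) =====
theorem score_nguyenquan_spec : Claim_equal_score_nguyenquan := by
  intro key _
  unfold Spec_score_nguyenquan score_nguyenquan score_nguyenquan_alt
  show pvA4.foldl (fun s i => if PySem.Str.find key i ≠ -1 then s + 5 else s)
      (pvA3.foldl (fun s i => if PySem.Str.find key i ≠ -1 then s + 3 else s)
        (pvA2.foldl (fun s i => if PySem.Str.find key i ≠ -1 then s + 1 else s) 0)) = _
  rw [pv_foldl_w, pv_foldl_w, pv_foldl_w]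
  have h2 := pv_block key pvA2 2 (by decide) (by decide)
  have h3 := pv_block key pvA3 3 (by decide) (by decide)
  have h4 := pv_block key pvA4 4 (by decide) (by decide)
  norm_num at h2 h3 h4
  have e2 : pvT2 = PySem.Set.ofList pvA2 := rfl
  have e3 : pvT3 = PySem.Set.ofList pvA3 := rfl
  have e4 : pvT4 = PySem.Set.ofList pvA4 := rfl
  rw [e2, e3, e4, ← h2, ← h3, ← h4]
  have hfun : (fun p => decide (PySem.Str.find key p ≠ -1))
      = (fun p => !decide (PySem.Chars.find key.toList p.toList = -1)) := by
    funext p; simp [PySem.Str.find]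
  rw [hfun]
  ring
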